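-- pv_equiv track=rewrite | github.com/sambid9988/python_practice | py_practice8.py | jumpingOnClouds
-- ===== SOURCE A (Python) =====
-- def jumpingOnClouds(c, k):
--     energy = 100 #initial energy
--     n=len(c)
--     i = k % n #initial jump from 0
--     energy -= c[i] * 2 + 1 #initial energy loss
--
--     while i != 0:
--         i = (i + k) % n
--         energy -= c[i] * 2 + 1
--     return energy
-- ===== SOURCE B (Python) =====
-- def jumpingOnClouds(c, k):
--     n = len(c)
--     j = k % n  # raises ZeroDivisionError on empty c, like the original
--     # gcd(n, j) by Euclid; the orbit 0, k, 2k, ... (mod n) returns to 0 after n // gcd steps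
--     g = n
--     while j:
--         g, j = j, g % j
--     steps = n // g
--     energy = 100
--     for s in range(1, steps + 1):
--         energy -= c[s * k % n] * 2 + 1
--     return energy
-- ===== Notes on version B (the rewrite author's own statement) =====
-- stated objective: alternative
-- what changed: Replaces A's 'jump until the index returns to 0' while-loop by computing the orbit length n // gcd(n, k % n) up front (Euclid's algorithm) and then a bounded for-loop over the directly computed indices s*k % n.
import Mathlib
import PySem

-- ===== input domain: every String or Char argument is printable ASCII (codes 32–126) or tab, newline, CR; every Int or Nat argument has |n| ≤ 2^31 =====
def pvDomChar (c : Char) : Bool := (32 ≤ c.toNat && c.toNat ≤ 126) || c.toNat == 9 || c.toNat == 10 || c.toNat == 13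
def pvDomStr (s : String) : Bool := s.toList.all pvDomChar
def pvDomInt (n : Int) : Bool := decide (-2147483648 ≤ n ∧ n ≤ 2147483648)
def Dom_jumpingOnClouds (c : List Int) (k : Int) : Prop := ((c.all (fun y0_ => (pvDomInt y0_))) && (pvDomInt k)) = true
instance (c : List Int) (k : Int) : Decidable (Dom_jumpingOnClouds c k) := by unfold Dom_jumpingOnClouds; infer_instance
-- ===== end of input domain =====

-- B replaces A's "jump until the index returns to 0" while-loop by the closed-form orbit
-- length n // gcd(n, k % n) and a direct for-loop over s*k % n (objective: alternative decomposition).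

-- ===== PORT A =====
-- while i != 0: i = (i+k) % n; energy -= c[i]*2+1 — fuel only makes the loop total;
-- under Pre_ the fuel c.length is never exhausted (proved below).
def pvLoopA (c : List Int) (k n : Int) : Nat → Int → Int → Int
  | 0, _, energy => energy
  | fuel+1, i, energy =>
    if i = 0 then energy
    else
      let i' := PySem.Int.mod (i + k) n
      pvLoopA c k n fuel i' (energy - ((PySem.List.pyGet? c i').getD 0 * 2 + 1))

def jumpingOnClouds (c : List Int) (k : Int) : Int :=
  let n : Int := (c.length : Int)
  let i := PySem.Int.mod k n
  let energy := 100 - ((PySem.List.pyGet? c i).getD 0 * 2 + 1)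
  pvLoopA c k n c.length i energy

-- ===== PORT B =====
-- Euclid's loop `while j: g, j = j, g % j`; j = k % len(c) is nonnegative, so Nat is exact.
def pvGcdLoop (g j : Nat) : Nat :=
  if h : j = 0 then g else pvGcdLoop j (g % j)
termination_by j
decreasing_by exact Nat.mod_lt _ (Nat.pos_of_ne_zero h)

def jumpingOnClouds_alt (c : List Int) (k : Int) : Int :=
  let n := c.length
  let j := PySem.Int.mod k (n : Int)
  let g := pvGcdLoop n j.toNat
  let steps := n / g
  (PySem.List.pyRange 1 ((steps : Int) + 1) 1).foldl
    (fun energy s =>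
      energy - ((PySem.List.pyGet? c (PySem.Int.mod (s * k) (n : Int))).getD 0 * 2 + 1)) 100

-- ===== PRECONDITION & SPEC =====
-- On c = [] both programs raise ZeroDivisionError at `k % n`; Pre_ excludes exactly that.
def Pre_jumpingOnClouds (c : List Int) (k : Int) : Prop := c ≠ []
instance (c : List Int) (k : Int) : Decidable (Pre_jumpingOnClouds c k) := by
  unfold Pre_jumpingOnClouds; infer_instance
def pvWitness_jumpingOnClouds : List Int × Int := ([0, 1, 0, 0], 2)

def Spec_jumpingOnClouds (c : List Int) (k : Int) (out : Int) : Prop := out = jumpingOnClouds_alt c k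
instance (c : List Int) (k : Int) (out : Int) : Decidable (Spec_jumpingOnClouds c k out) := by
  unfold Spec_jumpingOnClouds; infer_instance

-- ===== CLAIM (what is proved, stated in full; the proofs are below) =====
def Claim_equal_jumpingOnClouds : Prop := ∀ (c : List Int) (k : Int), Dom_jumpingOnClouds c k → Pre_jumpingOnClouds c k → Spec_jumpingOnClouds c k (jumpingOnClouds c k)

-- ===== LEMMAS AND PROOFS =====

theorem pvGcdLoop_eq (j : Nat) : ∀ g, pvGcdLoop g j = Nat.gcd j g := by
  induction j using Nat.strong_induction_on with
  | _ j ih =>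
    intro g
    unfold pvGcdLoop
    by_cases h : j = 0
    · simp [h]
    · rw [dif_neg h, ih (g % j) (Nat.mod_lt _ (Nat.pos_of_ne_zero h)) j]
      exact (Nat.gcd_rec j g).symm

-- k0 := (k % n).toNat; then k ≡ k0 [mod n]
theorem pv_k0_cast (k : Int) (n : Nat) (hn : 0 < n) :
    ((PySem.Int.mod k (n : Int)).toNat : Int) = k % (n : Int) := by
  rw [PySem.Int.mod_eq_emod_of_pos (by exact_mod_cast hn)]
  exact Int.toNat_of_nonneg (Int.emod_nonneg _ (by positivity))

theorem pv_mul_emod (k : Int) (n : Nat) (k0 : Nat)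
    (hk0 : (k0 : Int) = k % (n : Int)) (s : Nat) :
    ((s : Int) * (k0 : Int)) % (n : Int) = ((s : Int) * k) % (n : Int) := by
  rw [hk0, Int.mul_emod, Int.mul_emod (s : Int) k, Int.emod_emod_of_dvd _ dvd_rfl]

theorem pv_index (k : Int) (n : Nat) (hn : 0 < n) (k0 : Nat)
    (hk0 : (k0 : Int) = k % (n : Int)) (s : Nat) :
    PySem.Int.mod ((s : Int) * k) (n : Int) = ((s * k0 % n : Nat) : Int) := by
  rw [PySem.Int.mod_eq_emod_of_pos (by exact_mod_cast hn)]
  push_cast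
  exact (pv_mul_emod k n k0 hk0 s).symm

-- stepping the A-loop index: ((s*k0 % n) + k) % n = (s+1)*k0 % n
theorem pv_step (k : Int) (n : Nat) (hn : 0 < n) (k0 : Nat)
    (hk0 : (k0 : Int) = k % (n : Int)) (s : Nat) :
    PySem.Int.mod (((s * k0 % n : Nat) : Int) + k) (n : Int) = (((s + 1) * k0 % n : Nat) : Int) := by
  rw [PySem.Int.mod_eq_emod_of_pos (by exact_mod_cast hn)]
  have h2 := pv_index k n hn k0 hk0 (s + 1)
  rw [PySem.Int.mod_eq_emod_of_pos (by exact_mod_cast hn)] at h2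
  rw [← h2]
  push_cast
  rw [Int.add_emod, Int.emod_emod_of_dvd _ dvd_rfl, pv_mul_emod k n k0 hk0 s, ← Int.add_emod]
  ring_nf

-- the orbit closes exactly at multiples of p = n / gcd n k0
theorem pv_key (n k0 : Nat) (hn : 0 < n) (s : Nat) :
    s * k0 % n = 0 ↔ (n / Nat.gcd n k0) ∣ s := by
  have hg : 0 < Nat.gcd n k0 := Nat.gcd_pos_of_pos_left _ hn
  rw [← Nat.dvd_iff_mod_eq_zero]
  constructor
  · intro h
    have h1 : n / Nat.gcd n k0 ∣ s * (k0 / Nat.gcd n k0) := by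
      rcases h with ⟨t, ht⟩
      refine ⟨t, ?_⟩
      have := Nat.div_mul_cancel (Nat.gcd_dvd_left n k0)
      have hk := Nat.div_mul_cancel (Nat.gcd_dvd_right n k0)
      apply Nat.eq_of_mul_eq_mul_left hg
      calc Nat.gcd n k0 * (s * (k0 / Nat.gcd n k0))
          = s * (k0 / Nat.gcd n k0 * Nat.gcd n k0) := by ring
        _ = s * k0 := by rw [hk]
        _ = n * t := ht
        _ = n / Nat.gcd n k0 * Nat.gcd n k0 * t := by rw [Nat.div_mul_cancel (Nat.gcd_dvd_left n k0)]
        _ = Nat.gcd n k0 * (n / Nat.gcd n k0 * t) := by ring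
    exact (Nat.coprime_div_gcd_div_gcd hg).dvd_of_dvd_mul_right h1
  · rintro ⟨t, ht⟩
    refine ⟨t * (k0 / Nat.gcd n k0), ?_⟩
    calc s * k0 = n / Nat.gcd n k0 * t * k0 := by rw [ht]
      _ = n / Nat.gcd n k0 * t * (k0 / Nat.gcd n k0 * Nat.gcd n k0) := by
          rw [Nat.div_mul_cancel (Nat.gcd_dvd_right n k0)]
      _ = n / Nat.gcd n k0 * Nat.gcd n k0 * (t * (k0 / Nat.gcd n k0)) := by ring
      _ = n * (t * (k0 / Nat.gcd n k0)) := by rw [Nat.div_mul_cancel (Nat.gcd_dvd_left n k0)]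

theorem pv_main (c : List Int) (k : Int) (n k0 p : Nat) (_hnc : n = c.length) (hn : 0 < n)
    (hk0 : (k0 : Int) = k % (n : Int)) (hp : p = n / Nat.gcd n k0) :
    ∀ fuel s e, 1 ≤ s → s ≤ p → p - s ≤ fuel →
      pvLoopA c k (n : Int) fuel ((s * k0 % n : Nat) : Int) e =
      (PySem.List.pyRange ((s : Int) + 1) ((p : Int) + 1) 1).foldl
        (fun energy t =>
          energy - ((PySem.List.pyGet? c (PySem.Int.mod (t * k) (n : Int))).getD 0 * 2 + 1)) e := by
  have hppos : 0 < p := by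
    rw [hp]
    exact Nat.div_pos (Nat.le_of_dvd hn (Nat.gcd_dvd_left n k0)) (Nat.gcd_pos_of_pos_left _ hn)
  intro fuel
  induction fuel with
  | zero =>
    intro s e h1 h2 h3
    have hs : s = p := by omega
    have hz : s * k0 % n = 0 := (pv_key n k0 hn s).mpr (by simp [hs, hp])
    rw [hz, hs]
    rw [PySem.List.pyRange_one_eq_nil (by omega)]
    simp [pvLoopA]
  | succ fuel ih =>
    intro s e h1 h2 h3
    by_cases hd : (n / Nat.gcd n k0) ∣ s
    · have hs : s = p := by
        have := Nat.le_of_dvd (by omega) hd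
        omega
      have hz : s * k0 % n = 0 := (pv_key n k0 hn s).mpr hd
      rw [hz, hs]
      rw [PySem.List.pyRange_one_eq_nil (by omega)]
      simp [pvLoopA]
    · have hz : s * k0 % n ≠ 0 := fun h => hd ((pv_key n k0 hn s).mp h)
      have hps : (n / Nat.gcd n k0) ∣ p := hp ▸ dvd_rfl
      have hsp : s < p := by
        by_contra hcon
        have hse : s = p := by omega
        exact hd (hse ▸ hps)
      simp only [pvLoopA]
      rw [if_neg (by exact_mod_cast hz)]
      rw [pv_step k n hn k0 hk0 s]
      rw [ih (s + 1) _ (by omega) (by omega) (by omega)]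
      have hcast : ((s + 1 : Nat) : Int) = (s : Int) + 1 := by push_cast; ring
      rw [hcast]
      rw [PySem.List.pyRange_one_cons (show (s : Int) + 1 < (p : Int) + 1 by omega)]
      rw [List.foldl_cons]
      have hidx : PySem.Int.mod (((s : Int) + 1) * k) (n : Int) = (((s + 1) * k0 % n : Nat) : Int) := by
        rw [← hcast]; exact pv_index k n hn k0 hk0 (s + 1)
      rw [hidx]

-- ===== VERDICT (by name: the statement is the Claim_ definition above) =====
theorem jumpingOnClouds_spec : Claim_equal_jumpingOnClouds := by
  intro c k _ hpre
  unfold Spec_jumpingOnClouds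
  simp only [jumpingOnClouds, jumpingOnClouds_alt]
  have hn : 0 < c.length := List.length_pos_of_ne_nil hpre
  set n := c.length with hnc
  set k0 := (PySem.Int.mod k (n : Int)).toNat with hk0def
  have hk0 : (k0 : Int) = k % (n : Int) := pv_k0_cast k n hn
  have hk0lt : k0 < n := by
    have := PySem.Int.mod_lt k (b := (n : Int)) (by exact_mod_cast hn)
    rw [hk0def]
    omega
  set p := n / Nat.gcd n k0 with hp
  have hppos : 0 < p := by
    rw [hp]
    exact Nat.div_pos (Nat.le_of_dvd hn (Nat.gcd_dvd_left n k0)) (Nat.gcd_pos_of_pos_left _ hn)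
  -- B's gcd loop computes Nat.gcd n k0, so its steps = p
  have hgcd : pvGcdLoop n k0 = Nat.gcd n k0 := by rw [pvGcdLoop_eq, Nat.gcd_comm]
  -- initial index is k0 = 1 * k0 % n
  have hi : PySem.Int.mod k (n : Int) = ((1 * k0 % n : Nat) : Int) := by
    rw [Nat.one_mul, Nat.mod_eq_of_lt hk0lt, hk0def]
    exact (Int.toNat_of_nonneg (by
      rw [PySem.Int.mod_eq_emod_of_pos (by exact_mod_cast hn)]
      exact Int.emod_nonneg _ (by positivity))).symm
  have hple : p ≤ n := by rw [hp]; exact Nat.div_le_self _ _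
  rw [hi, pv_main c k n k0 p hnc hn hk0 hp n 1 _ (by omega) (by omega) (by omega)]
  rw [hgcd, ← hp]
  rw [PySem.List.pyRange_one_cons (show (1 : Int) < (p : Int) + 1 by omega),
    List.foldl_cons]
  have h1 : PySem.Int.mod (1 * k) ((n : Nat) : Int) = ((1 * k0 % n : Nat) : Int) := by
    have h := pv_index k n hn k0 hk0 1
    simpa using h
  rw [h1]
  norm_num
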